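-- pv_equiv track=rewrite | github.com/mach8686devops/leetcode-100 | lintcode1852.py | FinalDiscountedPrice
-- ===== SOURCE A (Python) =====
-- def FinalDiscountedPrice(prices):
--     # write your code here
--     n = len(prices)
--     s, res = [], [prices[i] for i in range(n)]
--
--     for i in range(n):
--         while s and prices[s[-1]] >= prices[i]:
--             index = s[-1]
--             s.pop()
--             res[index] = prices[index] - prices[i]
--         s.append(i)
--     return res
-- ===== SOURCE B (Python) =====
-- def FinalDiscountedPrice(prices):
--     n = len(prices)
--     res = []
--     for i in range(n):
--         p = prices[i]
--         d = p
--         for j in range(i + 1, n):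
--             if prices[j] <= p:
--                 d = p - prices[j]
--                 break
--         res.append(d)
--     return res
-- ===== Notes on version B (the rewrite author's own statement) =====
-- stated objective: simpler
-- what changed: Replaces the monotonic-stack pass with in-place updates by a direct per-element forward scan: for each price, subtract the first later price that is <= it.
import Mathlib
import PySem

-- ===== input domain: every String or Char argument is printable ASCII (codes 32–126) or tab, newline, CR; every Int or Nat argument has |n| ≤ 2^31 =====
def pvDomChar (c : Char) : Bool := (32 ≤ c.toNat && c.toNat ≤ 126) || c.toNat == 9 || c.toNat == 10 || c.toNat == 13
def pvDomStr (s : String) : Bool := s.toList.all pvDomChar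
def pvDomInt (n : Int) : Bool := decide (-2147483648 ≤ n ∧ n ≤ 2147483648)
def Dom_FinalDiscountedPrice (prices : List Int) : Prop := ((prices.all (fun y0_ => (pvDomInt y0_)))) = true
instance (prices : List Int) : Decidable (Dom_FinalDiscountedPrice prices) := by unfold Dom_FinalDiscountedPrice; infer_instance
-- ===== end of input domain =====

-- B replaces A's monotonic-stack pass with a per-element forward scan (simpler, not faster).

-- ===== PORT A =====
-- prices[k]: every index A uses comes from range(n) (directly or pushed from it), hence in range;
-- getD 0 is therefore exact here.
def pvGet (P : List Int) (k : Nat) : Int := P.getD k 0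

-- the inner `while s and prices[s[-1]] >= prices[i]` loop; the stack is held head = top
def pvPop (P : List Int) (i : Nat) : List Nat → List Int → List Nat × List Int
  | [], res => ([], res)
  | k :: rest, res =>
    if pvGet P i ≤ pvGet P k then
      pvPop P i rest (res.set k (pvGet P k - pvGet P i))
    else (k :: rest, res)

def pvStep (P : List Int) (st : List Nat × List Int) (i : Nat) : List Nat × List Int :=
  let (s, res) := pvPop P i st.1 st.2
  (i :: s, res)

def FinalDiscountedPrice (prices : List Int) : List Int :=
  let n := prices.length
  let res := (List.range n).map (fun i => pvGet prices i)
  ((List.range n).foldl (pvStep prices) ([], res)).2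

-- ===== PORT B =====
-- for each price p, subtract the first later price q with q <= p (none ⇒ keep p)
def pvScan : List Int → List Int
  | [] => []
  | p :: rest =>
    (match rest.find? (fun q => q ≤ p) with
     | some q => p - q
     | none => p) :: pvScan rest

def FinalDiscountedPrice_alt (prices : List Int) : List Int := pvScan prices

-- ===== PRECONDITION & SPEC =====
def Spec_FinalDiscountedPrice (prices : List Int) (out : List Int) : Prop := out = FinalDiscountedPrice_alt prices
instance (prices : List Int) (out : List Int) : Decidable (Spec_FinalDiscountedPrice prices out) := by unfold Spec_FinalDiscountedPrice; infer_instance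

-- ===== CLAIM (what is proved, stated in full; the proofs are below) =====
def Claim_equal_FinalDiscountedPrice : Prop := ∀ (prices : List Int), Dom_FinalDiscountedPrice prices → Spec_FinalDiscountedPrice prices (FinalDiscountedPrice prices)

-- ===== LEMMAS AND PROOFS =====

-- the per-index intended value: price minus the first later price that is ≤ it
def pvTarget (P : List Int) (k : Nat) : Int :=
  match (P.drop (k + 1)).find? (fun q => q ≤ pvGet P k) with
  | some q => pvGet P k - q
  | none => pvGet P k

theorem pvScan_length (P : List Int) : (pvScan P).length = P.length := by
  induction P with
  | nil => rfl
  | cons p rest ih => simp [pvScan, ih]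

theorem pvScan_getD (P : List Int) (k : Nat) (hk : k < P.length) :
    (pvScan P).getD k 0 = pvTarget P k := by
  induction P generalizing k with
  | nil => simp at hk
  | cons p rest ih =>
    cases k with
    | zero => simp [pvScan, pvTarget, pvGet]
    | succ k =>
      have hk' : k < rest.length := by simpa using hk
      simp only [pvScan, List.getD_cons_succ]
      rw [ih k hk']
      simp [pvTarget, pvGet, List.drop_succ_cons]

-- the stack order: deeper entries have smaller index and strictly smaller price
def pvRel (P : List Int) (a b : Nat) : Prop := b < a ∧ pvGet P b < pvGet P a

theorem pvChainLt (P : List Int) (k : Nat) (rest : List Nat)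
    (h : List.IsChain (pvRel P) (k :: rest)) : ∀ k' ∈ rest, pvRel P k k' := by
  induction rest generalizing k with
  | nil => simp
  | cons r rs ih =>
    intro k' hk'
    have h1 : pvRel P k r := (List.isChain_cons_cons.mp h).1
    have h2 : List.IsChain (pvRel P) (r :: rs) := (List.isChain_cons_cons.mp h).2
    rcases List.mem_cons.mp hk' with h' | h'
    · subst h'; exact h1
    · have := ih r h2 k' h'
      exact ⟨lt_trans this.1 h1.1, lt_trans this.2 h1.2⟩

theorem pvFind_some (P : List Int) (k i : Nat) (hk : k < i) (hi : i < P.length)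
    (hfirst : ∀ j, k < j → j < i → ¬ (pvGet P j ≤ pvGet P k))
    (hle : pvGet P i ≤ pvGet P k) :
    (P.drop (k + 1)).find? (fun q => q ≤ pvGet P k) = some (pvGet P i) := by
  have hidx : i - (k + 1) < (P.drop (k + 1)).length := by
    rw [List.length_drop]; omega
  rw [List.find?_eq_some_iff_getElem]
  refine ⟨by simpa using hle, i - (k + 1), hidx, ?_, ?_⟩
  · rw [List.getElem_drop]
    have h : k + 1 + (i - (k + 1)) = i := by omega
    simp [h, pvGet, List.getElem?_eq_getElem hi, List.getD_eq_getElem?_getD]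
  · intro j hj
    rw [List.getElem_drop]
    have hjP : k + 1 + j < P.length := by
      have := hidx; rw [List.length_drop] at this; omega
    have h := hfirst (k + 1 + j) (by omega) (by omega)
    simp only [pvGet, List.getD_eq_getElem _ _ hjP] at h
    simpa [pvGet] using h

theorem pvFind_none (P : List Int) (k : Nat)
    (hfirst : ∀ j, k < j → j < P.length → ¬ (pvGet P j ≤ pvGet P k)) :
    (P.drop (k + 1)).find? (fun q => q ≤ pvGet P k) = none := by
  rw [List.find?_eq_none]
  intro q hq
  obtain ⟨m, hm, hget⟩ := List.getElem_of_mem hq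
  rw [List.getElem_drop] at hget
  have hmP : k + 1 + m < P.length := by
    rw [List.length_drop] at hm; omega
  have h := hfirst (k + 1 + m) (by omega) hmP
  simp only [pvGet, List.getD_eq_getElem _ _ hmP] at h
  rw [hget] at h
  simpa using h

-- what one execution of the while-loop guarantees
theorem pvPop_spec (P : List Int) (i : Nat) (hi : i < P.length) :
    ∀ (s : List Nat) (res : List Int),
    (∀ k ∈ s, k < i) →
    List.IsChain (pvRel P) s →
    (∀ k ∈ s, ∀ j, k < j → j < i → ¬ (pvGet P j ≤ pvGet P k)) →
    (∀ k ∈ s, res.getD k 0 = pvGet P k) →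
    res.length = P.length →
    (∀ k, k < i → k ∉ s → res.getD k 0 = pvTarget P k) →
    (∀ k, i ≤ k → res.getD k 0 = pvGet P k) →
    (pvPop P i s res).2.length = P.length ∧
    (∀ k ∈ (pvPop P i s res).1, k < i) ∧
    List.IsChain (pvRel P) (pvPop P i s res).1 ∧
    (∀ k ∈ (pvPop P i s res).1, ∀ j, k < j → j < i → ¬ (pvGet P j ≤ pvGet P k)) ∧
    (∀ k ∈ (pvPop P i s res).1, (pvPop P i s res).2.getD k 0 = pvGet P k) ∧
    (∀ k, k < i → k ∉ (pvPop P i s res).1 → (pvPop P i s res).2.getD k 0 = pvTarget P k) ∧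
    (∀ k, i ≤ k → (pvPop P i s res).2.getD k 0 = pvGet P k) ∧
    (∀ k ∈ (pvPop P i s res).1, pvGet P k < pvGet P i) := by
  intro s
  induction s with
  | nil =>
    intro res h1 h2 h3 h4 h5 h6 h7
    simp only [pvPop]
    exact ⟨h5, by simp, by simp, by simp, by simp, by simpa using h6, h7, by simp⟩
  | cons k rest ih =>
    intro res h1 h2 h3 h4 h5 h6 h7
    by_cases hc : pvGet P i ≤ pvGet P k
    · -- pop k, set res[k] := P[k] - P[i]
      simp only [pvPop, if_pos hc]
      set res' := res.set k (pvGet P k - pvGet P i) with hres'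
      have hkP : k < res.length := by
        rw [h5]; exact lt_trans (h1 k (by simp)) hi
      have hdistinct : ∀ k' ∈ rest, k' ≠ k := fun k' hk' =>
        Nat.ne_of_lt (pvChainLt P k rest h2 k' hk').1
      have hset_ne : ∀ k', k' ≠ k → res'.getD k' 0 = res.getD k' 0 := by
        intro k' hk'
        simp [hres', List.getD_eq_getElem?_getD, List.getElem?_set_ne (fun h => hk' h.symm)]
      have hset_self : res'.getD k 0 = pvGet P k - pvGet P i := by
        simp [hres', List.getD_eq_getElem?_getD, hkP]
      apply ih res'
      · exact fun k' hk' => h1 k' (List.mem_cons_of_mem _ hk')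
      · exact h2.tail
      · exact fun k' hk' => h3 k' (List.mem_cons_of_mem _ hk')
      · intro k' hk'
        rw [hset_ne k' (hdistinct k' hk')]
        exact h4 k' (List.mem_cons_of_mem _ hk')
      · simp [hres', h5]
      · intro k' hk' hnk'
        by_cases he : k' = k
        · subst he
          rw [hset_self]
          unfold pvTarget
          rw [pvFind_some P k' i hk' hi (h3 k' (by simp)) hc]
        · rw [hset_ne k' he]
          exact h6 k' hk' (by simp [he, hnk'])
      · intro k' hk'
        have : k' ≠ k := by
          have := h1 k (by simp); omega
        rw [hset_ne k' this]
        exact h7 k' hk'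
    · -- stop: top fails the test
      simp only [pvPop, if_neg hc]
      refine ⟨h5, h1, h2, h3, h4, h6, h7, ?_⟩
      intro k' hk'
      rcases List.mem_cons.mp hk' with h' | h'
      · subst h'; omega
      · have := (pvChainLt P k rest h2 k' h').2
        omega

-- invariant of the fold over range n, threaded through pvStep
theorem pvFold_inv (P : List Int) (i : Nat) (hi : i ≤ P.length) :
    (((List.range i).foldl (pvStep P) ([], (List.range P.length).map (fun j => pvGet P j))).2.length = P.length) ∧
    (∀ k ∈ ((List.range i).foldl (pvStep P) ([], (List.range P.length).map (fun j => pvGet P j))).1, k < i) ∧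
    List.IsChain (pvRel P) ((List.range i).foldl (pvStep P) ([], (List.range P.length).map (fun j => pvGet P j))).1 ∧
    (∀ k ∈ ((List.range i).foldl (pvStep P) ([], (List.range P.length).map (fun j => pvGet P j))).1,
      ∀ j, k < j → j < i → ¬ (pvGet P j ≤ pvGet P k)) ∧
    (∀ k ∈ ((List.range i).foldl (pvStep P) ([], (List.range P.length).map (fun j => pvGet P j))).1,
      ((List.range i).foldl (pvStep P) ([], (List.range P.length).map (fun j => pvGet P j))).2.getD k 0 = pvGet P k) ∧
    (∀ k, k < i → k ∉ ((List.range i).foldl (pvStep P) ([], (List.range P.length).map (fun j => pvGet P j))).1 →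
      ((List.range i).foldl (pvStep P) ([], (List.range P.length).map (fun j => pvGet P j))).2.getD k 0 = pvTarget P k) ∧
    (∀ k, i ≤ k → ((List.range i).foldl (pvStep P) ([], (List.range P.length).map (fun j => pvGet P j))).2.getD k 0 = pvGet P k) := by
  induction i with
  | zero =>
    simp only [List.range_zero, List.foldl_nil]
    refine ⟨by simp, by simp, List.isChain_nil, by simp, by simp, by simp, ?_⟩
    intro k _
    by_cases hk : k < P.length
    · simp [List.getD_eq_getElem?_getD, hk]
    · have h1 : ((List.range P.length).map (fun j => pvGet P j)).length ≤ k := by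
        simpa using Nat.le_of_not_lt hk
      rw [List.getD_eq_getElem?_getD, List.getElem?_eq_none h1]
      simp [pvGet, List.getD_eq_getElem?_getD, List.getElem?_eq_none (Nat.le_of_not_lt hk)]
  | succ i ih =>
    have hi' : i < P.length := hi
    obtain ⟨h5, h1, h2, h3, h4, h6, h7⟩ := ih (Nat.le_of_lt hi')
    rw [List.range_succ, List.foldl_append, List.foldl_cons, List.foldl_nil]
    set st := (List.range i).foldl (pvStep P) ([], (List.range P.length).map (fun j => pvGet P j)) with hst
    obtain ⟨g5, g1, g2, g3, g4, g6, g7, g8⟩ :=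
      pvPop_spec P i hi' st.1 st.2 h1 h2 h3 h4 h5 h6 h7
    have hstep : pvStep P st i = (i :: (pvPop P i st.1 st.2).1, (pvPop P i st.1 st.2).2) := by
      simp [pvStep]
    rw [hstep]
    refine ⟨g5, ?_, ?_, ?_, ?_, ?_, ?_⟩
    · intro k hk
      rcases List.mem_cons.mp hk with h | h
      · omega
      · exact Nat.lt_succ_of_lt (g1 k h)
    · cases hcase : (pvPop P i st.1 st.2).1 with
      | nil => exact List.isChain_singleton i
      | cons y ys =>
        apply List.isChain_cons_cons.mpr
        have hy : y ∈ (pvPop P i st.1 st.2).1 := by rw [hcase]; simp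
        exact ⟨⟨g1 y hy, g8 y hy⟩, hcase ▸ g2⟩
    · intro k hk j hkj hji
      rcases List.mem_cons.mp hk with h | h
      · omega
      · rcases Nat.lt_succ_iff_lt_or_eq.mp hji with hj | hj
        · exact g3 k h j hkj hj
        · subst hj
          intro hle
          exact absurd hle (not_le.mpr (g8 k h))
    · intro k hk
      rcases List.mem_cons.mp hk with h | h
      · subst h; exact g7 k (le_refl k)
      · exact g4 k h
    · intro k hk hnk
      have hki : k ≠ i := fun he => hnk (by simp [he])
      have hkrest : k ∉ (pvPop P i st.1 st.2).1 := fun hm => hnk (by simp [hm])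
      exact g6 k (by omega) hkrest
    · intro k hk
      exact g7 k (by omega)

-- ===== VERDICT (by name: the statement is the Claim_ definition above) =====
theorem FinalDiscountedPrice_spec : Claim_equal_FinalDiscountedPrice := by
  intro P _
  unfold Spec_FinalDiscountedPrice FinalDiscountedPrice FinalDiscountedPrice_alt
  obtain ⟨h5, h1, h2, h3, h4, h6, h7⟩ := pvFold_inv P P.length (le_refl _)
  set st := (List.range P.length).foldl (pvStep P) ([], (List.range P.length).map (fun j => pvGet P j)) with hst
  have hall : ∀ k, k < P.length → st.2.getD k 0 = pvTarget P k := by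
    intro k hk
    by_cases hm : k ∈ st.1
    · have hnone := pvFind_none P k (h3 k hm)
      rw [h4 k hm]
      unfold pvTarget
      rw [hnone]
    · exact h6 k hk hm
  apply List.ext_getElem
  · rw [h5, pvScan_length]
  · intro n hn1 hn2
    have hn : n < P.length := by rw [pvScan_length] at hn2; exact hn2
    have e1 : st.2[n] = st.2.getD n 0 := (List.getD_eq_getElem _ _ hn1).symm
    have e2 : (pvScan P)[n] = (pvScan P).getD n 0 := (List.getD_eq_getElem _ _ hn2).symm
    rw [e1, e2, hall n hn, pvScan_getD P n hn]
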